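-- pv_equiv track=rewrite | github.com/Ural0/Pyhton | Einführung in die İnformatik/b07a3.py | pyramide_seq
-- ===== SOURCE A (Python) =====
-- def pyramide(n):
--     # Hilfsfunktion: fügt links und rechts jeweils eine Spalte Leerzeichen hinzu
--     def pyramide_padded(p):
--         zeilen = p.split("\n")
--         ergebnis = ""
--         for z in zeilen:
--             ergebnis += " " + z + " \n"
--         return ergebnis.rstrip("\n")
--
--     # Basisfall: Höhe 1 → eine einzelne Spitze
--     if n == 1:
--         return "*"
--     else:
--         # Rekursiver Aufbau: kleinere Pyramide + neue Basiszeile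
--         return pyramide_padded(pyramide(n - 1)) + "\n" + (2 * n - 1) * "*"
--
-- def pyramide_seq(n, k):
--     # Basisfall 1 keine weitere Unterteilung
--     if k == 0:
--         return pyramide(n)
--
--     # Basisfall 2 minimale Höhe
--     if n == 1:
--         return "*"
--
--     # Rekursive Berechnung der linken und rechten Teilsequenz
--     links = pyramide_seq(n // 2, k - 1)
--     mitte = pyramide(n)
--     rechts = pyramide_seq(n // 2, k - 1)
--
--     # Aufteilen in einzelne Zeilen
--     links_zeilen = links.split("\n")
--     mitte_zeilen = mitte.split("\n")
--     rechts_zeilen = rechts.split("\n")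
--
--     # Breiten der einzelnen Blöcke bestimmen
--     breite_links = max(len(z) for z in links_zeilen)
--     breite_mitte = max(len(z) for z in mitte_zeilen)
--     breite_rechts = max(len(z) for z in rechts_zeilen)
--
--     # Vertikale Ausrichtung Teilsequenzen unten ausrichten
--     offset_links = len(mitte_zeilen) - len(links_zeilen)
--     offset_rechts = len(mitte_zeilen) - len(rechts_zeilen)
--
--     ergebnis = []
--
--     # Zeilenweise Kombination links – mitte – rechts
--     for i in range(len(mitte_zeilen)):
--         # Linker Block
--         if i < offset_links:
--             l = " " * breite_links
--         else:
--             l = links_zeilen[i - offset_links].ljust(breite_links)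
--
--         # mittlerer Block
--         m = mitte_zeilen[i].ljust(breite_mitte)
--
--         # rechter Block
--         if i < offset_rechts:
--             r = " " * breite_rechts
--         else:
--             r = rechts_zeilen[i - offset_rechts].ljust(breite_rechts)
--
--         ergebnis.append(l + " " + m + " " + r)
--
--     return "\n".join(ergebnis)
-- ===== SOURCE B (Python) =====
-- # B: builds the picture as a list of lines and joins once at the end; the two
-- # identical recursive halves are computed ONCE and reused (O(k+log n) recursive
-- # calls instead of A's O(2^k)), and rows are combined by zipping the shared
-- # side block with the middle block instead of an indexed loop with two branches.
--
-- def _pyr_lines(n):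
--     lines = ["*"]
--     for i in range(2, n + 1):
--         lines = [" " + z + " " for z in lines] + ["*" * (2 * i - 1)]
--     return lines
--
-- def _seq_lines(n, k):
--     if k == 0:
--         return _pyr_lines(n)
--     if n == 1:
--         return ["*"]
--     sub = _seq_lines(n // 2, k - 1)
--     mid = _pyr_lines(n)
--     w = max(len(z) for z in sub)
--     wm = max(len(z) for z in mid)
--     side = [" " * w] * (len(mid) - len(sub)) + [z.ljust(w) for z in sub]
--     return [s + " " + m.ljust(wm) + " " + s for s, m in zip(side, mid)]
--
-- def pyramide_seq(n, k):
--     return "\n".join(_seq_lines(n, k))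
-- ===== Notes on version B (the rewrite author's own statement) =====
-- stated objective: faster
-- what changed: B computes the two identical recursive halves once and reuses the result (O(k+log n) recursive calls instead of A's O(2^k)), builds the picture as a list of lines joined once at the end instead of repeatedly splitting and re-joining strings, and combines rows by zipping a shared side block with the middle block instead of an indexed loop with two offset branches.
import Mathlib
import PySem

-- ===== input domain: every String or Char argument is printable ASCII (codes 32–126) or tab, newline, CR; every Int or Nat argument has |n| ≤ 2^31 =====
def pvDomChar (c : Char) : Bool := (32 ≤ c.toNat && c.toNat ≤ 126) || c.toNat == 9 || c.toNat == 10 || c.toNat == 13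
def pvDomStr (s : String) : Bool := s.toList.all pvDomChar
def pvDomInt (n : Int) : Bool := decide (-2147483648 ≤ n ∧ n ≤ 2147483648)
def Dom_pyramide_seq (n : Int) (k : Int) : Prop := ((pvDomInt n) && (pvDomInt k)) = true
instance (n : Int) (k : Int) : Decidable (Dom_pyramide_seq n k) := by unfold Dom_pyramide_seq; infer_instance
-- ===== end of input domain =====

-- B builds the picture as a list of lines joined once at the end, computes the two identical
-- recursive halves once and reuses the result, and combines rows by zipping (objective: faster).


-- hand port of str.ljust(w) (PySem has no ljust); exact: pads with spaces on the right, no pad when w ≤ len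
def ljustC (z : List Char) (w : Nat) : List Char := z ++ List.replicate (w - z.length) ' '

-- ===== PORT A =====
-- hand port of str.rstrip("\n") (PySem's rstrip has no chars argument); exact: removes exactly the trailing '\n' characters
def rstripNLC (cs : List Char) : List Char := (cs.reverse.dropWhile (fun c => c == '\n')).reverse

def pyramide_paddedC (p : List Char) : List Char :=
  let zeilen := PySem.Chars.splitOn p ['\n']
  let ergebnis := zeilen.foldl (fun acc z => acc ++ (' ' :: (z ++ [' ', '\n']))) []
  rstripNLC ergebnis

-- Python's `pyramide`: for n ≤ 0 the Python recursion never returns, so the n = 1 base case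
-- is widened to n ≤ 1 purely as a totality guard (those inputs are outside Pre_).
def pyramideC (n : Int) : List Char :=
  if n ≤ 1 then ['*']
  else pyramide_paddedC (pyramideC (n - 1)) ++ '\n' :: List.replicate (2 * n - 1).toNat '*'
termination_by n.toNat
decreasing_by omega

-- Python's `pyramide_seq` on lists of code points; same totality guard n ≤ 1 (for n ≤ 0 with
-- k ≠ 0 the Python recursion never returns).
def pyramide_seqC (n : Int) (k : Int) : List Char :=
  if k = 0 then pyramideC n
  else if n ≤ 1 then ['*']
  else
    let links := pyramide_seqC (PySem.Int.floordiv n 2) (k - 1)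
    let mitte := pyramideC n
    let rechts := pyramide_seqC (PySem.Int.floordiv n 2) (k - 1)
    let links_zeilen := PySem.Chars.splitOn links ['\n']
    let mitte_zeilen := PySem.Chars.splitOn mitte ['\n']
    let rechts_zeilen := PySem.Chars.splitOn rechts ['\n']
    let breite_links := (PySem.List.max? (links_zeilen.map (·.length)) (fun x => x)).getD 0
    let breite_mitte := (PySem.List.max? (mitte_zeilen.map (·.length)) (fun x => x)).getD 0
    let breite_rechts := (PySem.List.max? (rechts_zeilen.map (·.length)) (fun x => x)).getD 0
    let offset_links : Int := (mitte_zeilen.length : Int) - (links_zeilen.length : Int)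
    let offset_rechts : Int := (mitte_zeilen.length : Int) - (rechts_zeilen.length : Int)
    let ergebnis := (PySem.List.pyRange 0 (mitte_zeilen.length : Int) 1).foldl (fun acc i =>
      let l := if i < offset_links then List.replicate breite_links ' '
               else ljustC (PySem.List.pyGetD links_zeilen (i - offset_links) []) breite_links
      let m := ljustC (PySem.List.pyGetD mitte_zeilen i []) breite_mitte
      let r := if i < offset_rechts then List.replicate breite_rechts ' '
               else ljustC (PySem.List.pyGetD rechts_zeilen (i - offset_rechts) []) breite_rechts
      acc ++ [l ++ ' ' :: (m ++ ' ' :: r)]) []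
    PySem.Chars.join ['\n'] ergebnis
termination_by n.toNat
decreasing_by
  have h2 : PySem.Int.floordiv n 2 = n / 2 := PySem.Int.floordiv_eq_ediv_of_pos (by omega)
  omega

def pyramide_seq (n : Int) (k : Int) : String := String.ofList (pyramide_seqC n k)

-- ===== PORT B =====
def pyrLinesC (n : Int) : List (List Char) :=
  (PySem.List.pyRange 2 (n + 1) 1).foldl
    (fun lines i => lines.map (fun z => ' ' :: (z ++ [' '])) ++ [List.replicate (2 * i - 1).toNat '*'])
    [['*']]

def seqLinesC (n : Int) (k : Int) : List (List Char) :=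
  if k = 0 then pyrLinesC n
  else if n = 1 then [['*']]
  -- totality guard: for n ≤ 0 with k < 0 the Python recursion never returns (outside Pre_)
  else if n ≤ 0 ∧ k < 0 then [['*']]
  else
    let sub := seqLinesC (PySem.Int.floordiv n 2) (k - 1)
    let mid := pyrLinesC n
    let w := (PySem.List.max? (sub.map (·.length)) (fun x => x)).getD 0
    let wm := (PySem.List.max? (mid.map (·.length)) (fun x => x)).getD 0
    let side := List.replicate (mid.length - sub.length) (List.replicate w ' ') ++ sub.map (fun z => ljustC z w)
    (side.zip mid).map (fun sm => sm.1 ++ ' ' :: (ljustC sm.2 wm ++ ' ' :: sm.1))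
termination_by (k.toNat, n.toNat)
decreasing_by
  have h2 : PySem.Int.floordiv n 2 = n / 2 := PySem.Int.floordiv_eq_ediv_of_pos (by omega)
  by_cases hk : 0 < k
  · exact Prod.Lex.left _ _ (by omega)
  · have h0 : (k - 1).toNat = 0 := by omega
    have h1 : k.toNat = 0 := by omega
    rw [h0, h1]
    exact Prod.Lex.right _ (by omega)

def pyramide_seq_alt (n : Int) (k : Int) : String := String.ofList (PySem.Chars.join ['\n'] (seqLinesC n k))

-- ===== PRECONDITION & SPEC =====
-- Pre_ excludes exactly n ≤ 0: there the Python recursion never returns (RecursionError).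
def Pre_pyramide_seq (n : Int) (k : Int) : Prop := 1 ≤ n
instance (n : Int) (k : Int) : Decidable (Pre_pyramide_seq n k) := by unfold Pre_pyramide_seq; infer_instance
def pvWitness_pyramide_seq : Int × Int := (3, 2)

def Spec_pyramide_seq (n : Int) (k : Int) (out : String) : Prop := out = pyramide_seq_alt n k
instance (n : Int) (k : Int) (out : String) : Decidable (Spec_pyramide_seq n k out) := by unfold Spec_pyramide_seq; infer_instance

-- ===== CLAIM (what is proved, stated in full; the proofs are below) =====
def Claim_equal_pyramide_seq : Prop := ∀ (n : Int) (k : Int), Dom_pyramide_seq n k → Pre_pyramide_seq n k → Spec_pyramide_seq n k (pyramide_seq n k)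

-- ===== LEMMAS AND PROOFS =====

def splitNLspec : List Char → List (List Char)
  | [] => [[]]
  | c :: t => if c = '\n' then [] :: splitNLspec t else (splitNLspec t).modifyHead (c :: ·)

theorem splitNLspec_ne_nil (cs : List Char) : splitNLspec cs ≠ [] := by
  induction cs with
  | nil => simp [splitNLspec]
  | cons c t ih =>
    simp only [splitNLspec]
    split_ifs
    · simp
    · cases h : splitNLspec t <;> simp_all

theorem splitOn_go_eq (cs : List Char) : ∀ (fuel : Nat) (cur : List Char) (acc : List (List Char)),
    cs.length ≤ fuel →
    PySem.Chars.splitOn.go ['\n'] fuel cs cur acc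
      = acc.reverse ++ (splitNLspec cs).modifyHead (cur.reverse ++ ·) := by
  induction cs with
  | nil =>
    intro fuel cur acc _
    cases fuel <;> simp [PySem.Chars.splitOn.go, splitNLspec]
  | cons c t ih =>
    intro fuel cur acc hf
    cases fuel with
    | zero => simp at hf
    | succ f =>
      rw [PySem.Chars.splitOn.go]
      by_cases hc : c = '\n'
      · subst hc
        have hpre : List.isPrefixOf ['\n'] ('\n' :: t) = true := by simp [List.isPrefixOf]
        simp only [hpre, if_pos, List.length_cons, List.length_nil, List.drop_succ_cons, List.drop_zero]
        rw [ih f [] ((cur.reverse) :: acc) (by simpa using hf)]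
        simp only [splitNLspec, List.reverse_nil, List.reverse_cons]
        cases splitNLspec t <;> simp
      · have hpre : List.isPrefixOf ['\n'] (c :: t) = false := by
          simp [List.isPrefixOf]; exact fun h => absurd h.symm hc
        simp only [hpre]
        rw [if_neg (by simp)]
        rw [ih f (c :: cur) acc (by simpa using hf)]
        simp only [splitNLspec, if_neg hc]
        cases h : splitNLspec t with
        | nil => exact absurd h (splitNLspec_ne_nil t)
        | cons hd tl => simp

theorem splitOn_eq_spec (cs : List Char) : PySem.Chars.splitOn cs ['\n'] = splitNLspec cs := by
  rw [PySem.Chars.splitOn]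
  rw [splitOn_go_eq cs (cs.length + 1) [] [] (by omega)]
  cases h : splitNLspec cs with
  | nil => exact absurd h (splitNLspec_ne_nil cs)
  | cons hd tl => simp

theorem splitNLspec_append (z u : List Char) (h : '\n' ∉ z) :
    splitNLspec (z ++ u) = (splitNLspec u).modifyHead (z ++ ·) := by
  induction z with
  | nil =>
    cases hu : splitNLspec u with
    | nil => exact absurd hu (splitNLspec_ne_nil u)
    | cons hd tl => simpa using hu
  | cons c t ih =>
    have hc : c ≠ '\n' := by simp at h; exact fun he => h.1 he.symm
    have ht : '\n' ∉ t := by simp at h; exact h.2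
    simp only [List.cons_append, splitNLspec, if_neg hc, ih ht]
    cases hu : splitNLspec u with
    | nil => exact absurd hu (splitNLspec_ne_nil u)
    | cons hd tl => simp

theorem split_join (ls : List (List Char)) (hnl : ∀ z ∈ ls, '\n' ∉ z) (hne : ls ≠ []) :
    PySem.Chars.splitOn (PySem.Chars.join ['\n'] ls) ['\n'] = ls := by
  induction ls with
  | nil => exact absurd rfl hne
  | cons z rest ih =>
    cases rest with
    | nil =>
      rw [PySem.Chars.join_singleton, splitOn_eq_spec]
      have hz : '\n' ∉ z := hnl z (by simp)
      have := splitNLspec_append z [] hz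
      simpa [splitNLspec] using this
    | cons w r =>
      rw [PySem.Chars.join_cons_cons, splitOn_eq_spec]
      have hz : '\n' ∉ z := hnl z (by simp)
      rw [List.append_assoc, splitNLspec_append z _ hz]
      have : splitNLspec (['\n'] ++ PySem.Chars.join ['\n'] (w :: r))
          = [] :: splitNLspec (PySem.Chars.join ['\n'] (w :: r)) := by
        simp [splitNLspec]
      rw [this]
      have ihh := ih (fun y hy => hnl y (by simp [hy])) (by simp)
      rw [splitOn_eq_spec] at ihh
      rw [ihh]
      simp

theorem join_ne_nil (ls : List (List Char)) (hne : ls ≠ []) (h1 : ∀ z ∈ ls, z ≠ []) :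
    PySem.Chars.join ['\n'] ls ≠ [] := by
  cases ls with
  | nil => exact absurd rfl hne
  | cons z rest =>
    cases rest with
    | nil => rw [PySem.Chars.join_singleton]; exact h1 z (by simp)
    | cons w r =>
      rw [PySem.Chars.join_cons_cons]
      have := h1 z (by simp)
      cases z <;> simp_all

theorem join_append_singleton (xs : List (List Char)) (y : List Char) (hne : xs ≠ []) :
    PySem.Chars.join ['\n'] (xs ++ [y]) = PySem.Chars.join ['\n'] xs ++ '\n' :: y := by
  induction xs with
  | nil => exact absurd rfl hne
  | cons z rest ih =>
    cases rest with
    | nil => simp [PySem.Chars.join_cons_cons, PySem.Chars.join_singleton]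
    | cons w r =>
      have ihh := ih (by simp)
      simp only [List.cons_append] at ihh ⊢
      rw [PySem.Chars.join_cons_cons, ihh, PySem.Chars.join_cons_cons]
      simp

theorem rstripNLC_append (a b : List Char) (h : rstripNLC b ≠ []) :
    rstripNLC (a ++ b) = a ++ rstripNLC b := by
  unfold rstripNLC at *
  rw [List.reverse_append, List.dropWhile_append]
  rw [if_neg (by simp_all)]
  simp

theorem rstripNLC_pad (z : List Char) :
    rstripNLC ((' ' :: (z ++ [' '])) ++ ['\n']) = ' ' :: (z ++ [' ']) := by
  unfold rstripNLC
  rw [List.reverse_append]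
  simp [List.dropWhile]

theorem rstrip_flat (ls : List (List Char)) (hne : ls ≠ []) :
    rstripNLC (ls.flatMap (fun z => (' ' :: (z ++ [' '])) ++ ['\n']))
      = PySem.Chars.join ['\n'] (ls.map (fun z => ' ' :: (z ++ [' ']))) := by
  induction ls with
  | nil => exact absurd rfl hne
  | cons z rest ih =>
    cases rest with
    | nil =>
      simp only [List.flatMap_cons, List.flatMap_nil, List.append_nil, List.map_cons,
        List.map_nil, PySem.Chars.join_singleton]
      exact rstripNLC_pad z
    | cons w r =>
      rw [List.flatMap_cons, rstripNLC_append, ih (by simp)]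
      · simp [PySem.Chars.join_cons_cons]
      · rw [ih (by simp)]
        apply join_ne_nil
        · simp
        · intro y hy
          simp only [List.mem_map] at hy
          obtain ⟨x, _, hx⟩ := hy
          rw [← hx]; simp

theorem padded_join (ls : List (List Char)) (hnl : ∀ z ∈ ls, '\n' ∉ z) (hne : ls ≠ []) :
    pyramide_paddedC (PySem.Chars.join ['\n'] ls)
      = PySem.Chars.join ['\n'] (ls.map (fun z => ' ' :: (z ++ [' ']))) := by
  simp only [pyramide_paddedC]
  rw [split_join ls hnl hne, PySem.List.foldl_append_eq_flatMap]
  simp only [List.nil_append]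
  have : (fun (z : List Char) => ' ' :: (z ++ [' ', '\n'])) = fun z => (' ' :: (z ++ [' '])) ++ ['\n'] := by
    funext z; simp
  rw [show (ls.flatMap fun z => ' ' :: (z ++ [' ', '\n'])) = ls.flatMap fun z => (' ' :: (z ++ [' '])) ++ ['\n'] from by rw [this]]
  exact rstrip_flat ls hne

theorem pyrLinesC_base (n : Int) (h : n ≤ 1) : pyrLinesC n = [['*']] := by
  unfold pyrLinesC
  have h2 : PySem.List.pyRange 2 (n + 1) 1 = [] := by
    simp [PySem.List.pyRange]; omega
  rw [h2]
  simp

theorem pyrLinesC_step (n : Int) (h : 2 ≤ n) :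
    pyrLinesC n = (pyrLinesC (n - 1)).map (fun z => ' ' :: (z ++ [' ']))
      ++ [List.replicate (2 * n - 1).toNat '*'] := by
  unfold pyrLinesC
  rw [PySem.List.pyRange_one_append 2 n (n + 1) (by omega) (by omega), List.foldl_append,
    PySem.List.pyRange_one_cons (by omega : n < n + 1)]
  have h2 : PySem.List.pyRange (n + 1) (n + 1) 1 = [] := by simp [pysem]
  have h3 : n - 1 + 1 = n := by ring
  rw [h2, h3]
  simp

theorem pyrLinesC_ne_nil (n : Int) : pyrLinesC n ≠ [] := by
  by_cases h : n ≤ 1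
  · rw [pyrLinesC_base n h]; simp
  · rw [pyrLinesC_step n (by omega)]; simp

theorem pyrLinesC_no_nl (n : Int) : ∀ z ∈ pyrLinesC n, '\n' ∉ z := by
  induction n using pyramideC.induct with
  | case1 n h => rw [pyrLinesC_base n h]; simp
  | case2 n h ih =>
    rw [pyrLinesC_step n (by omega)]
    intro z hz
    simp only [List.mem_append, List.mem_map, List.mem_singleton] at hz
    rcases hz with ⟨x, hx, rfl⟩ | rfl
    · have := ih x hx; simp_all
    · simp [List.mem_replicate]

theorem pyrLinesC_length (n : Int) (h : 1 ≤ n) : (pyrLinesC n).length = n.toNat := by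
  induction n using pyramideC.induct with
  | case1 n h1 => rw [pyrLinesC_base n h1]; simp; omega
  | case2 n h1 ih =>
    rw [pyrLinesC_step n (by omega)]
    simp only [List.length_append, List.length_map, List.length_singleton]
    rw [ih (by omega)]
    omega

theorem pyramideC_eq (n : Int) : pyramideC n = PySem.Chars.join ['\n'] (pyrLinesC n) := by
  induction n using pyramideC.induct with
  | case1 n h => rw [pyramideC, if_pos h, pyrLinesC_base n h, PySem.Chars.join_singleton]
  | case2 n h ih =>
    rw [pyramideC, if_neg h, pyrLinesC_step n (by omega), ih,
      padded_join _ (pyrLinesC_no_nl _) (pyrLinesC_ne_nil _),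
      join_append_singleton _ _ (by simp [pyrLinesC_ne_nil])]

theorem ljustC_no_nl (z : List Char) (w : Nat) (h : '\n' ∉ z) : '\n' ∉ ljustC z w := by
  simp [ljustC, List.mem_replicate]
  exact h

theorem seqLinesC_length (n : Int) (k : Int) (h : 1 ≤ n) : (seqLinesC n k).length = n.toNat := by
  induction n, k using seqLinesC.induct with
  | case1 n => rw [seqLinesC, if_pos rfl]; exact pyrLinesC_length n h
  | case2 k hk => rw [seqLinesC, if_neg hk, if_pos rfl]; simp
  | case3 n k hk hn hg => exact absurd h (by omega)
  | case4 n k hk hn hg ih =>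
    have hfd : PySem.Int.floordiv n 2 = n / 2 := PySem.Int.floordiv_eq_ediv_of_pos (by omega)
    have h1' : 1 ≤ PySem.Int.floordiv n 2 := by rw [hfd]; omega
    rw [seqLinesC, if_neg hk, if_neg hn, if_neg hg]
    simp only [List.length_map, List.length_zip, List.length_append, List.length_replicate]
    rw [ih h1', pyrLinesC_length n (by omega)]
    have : (PySem.Int.floordiv n 2).toNat ≤ n.toNat := by rw [hfd]; omega
    omega

theorem seqLinesC_ne_nil (n : Int) (k : Int) (h : 1 ≤ n) : seqLinesC n k ≠ [] := by
  intro hnil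
  have := seqLinesC_length n k h
  rw [hnil] at this
  simp at this
  omega

theorem seqLinesC_no_nl (n : Int) (k : Int) : ∀ z ∈ seqLinesC n k, '\n' ∉ z := by
  induction n, k using seqLinesC.induct with
  | case1 n => rw [seqLinesC, if_pos rfl]; exact pyrLinesC_no_nl n
  | case2 k hk => rw [seqLinesC, if_neg hk, if_pos rfl]; simp
  | case3 n k hk hn hg => rw [seqLinesC, if_neg hk, if_neg hn, if_pos hg]; simp
  | case4 n k hk hn hg ih =>
    rw [seqLinesC, if_neg hk, if_neg hn, if_neg hg]
    intro z hz
    simp only [List.mem_map] at hz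
    obtain ⟨sm, hsm, rfl⟩ := hz
    have hs : sm.1 ∈ _ := (List.of_mem_zip hsm).1
    have hm : sm.2 ∈ pyrLinesC n := (List.of_mem_zip hsm).2
    have hsnl : '\n' ∉ sm.1 := by
      rcases List.mem_append.1 hs with h1 | h1
      · have := List.mem_replicate.1 h1
        rw [this.2]; simp [List.mem_replicate]
      · simp only [List.mem_map] at h1
        obtain ⟨x, hx, hx2⟩ := h1
        rw [← hx2]
        exact ljustC_no_nl x _ (ih x hx)
    intro hmem
    rcases List.mem_append.1 hmem with h1 | h1
    · exact hsnl h1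
    · rcases List.mem_cons.1 h1 with h1 | h1
      · simp at h1
      · rcases List.mem_append.1 h1 with h2 | h2
        · exact ljustC_no_nl sm.2 _ (pyrLinesC_no_nl n sm.2 hm) h2
        · rcases List.mem_cons.1 h2 with h2 | h2
          · simp at h2
          · exact hsnl h2

theorem comb_lines_eq (sub mid : List (List Char)) (hle : sub.length ≤ mid.length)
    (w wm : Nat) (ol : Int) (hol : ol = (mid.length : Int) - (sub.length : Int)) :
    (PySem.List.pyRange 0 (mid.length : Int) 1).foldl (fun acc i =>
        acc ++ [(if i < ol then List.replicate w ' '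
                 else ljustC (PySem.List.pyGetD sub (i - ol) []) w) ++ ' ' ::
                (ljustC (PySem.List.pyGetD mid i []) wm ++ ' ' ::
                 (if i < ol then List.replicate w ' '
                  else ljustC (PySem.List.pyGetD sub (i - ol) []) w))]) []
      = ((List.replicate (mid.length - sub.length) (List.replicate w ' ')
          ++ sub.map (fun z => ljustC z w)).zip mid).map
          (fun sm => sm.1 ++ ' ' :: (ljustC sm.2 wm ++ ' ' :: sm.1)) := by
  rw [PySem.List.pyRange_zero_natCast, List.foldl_map, PySem.List.foldl_append_singleton_eq_map,
    List.nil_append]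
  apply List.ext_getElem
  · simp; omega
  · intro i hi1 hi2
    simp only [List.getElem_map, List.getElem_range, List.getElem_zip]
    have hi : i < mid.length := by simpa using hi1
    have hmidi : PySem.List.pyGetD mid (↑i) [] = mid[i] := by
      rw [PySem.List.pyGetD_natCast, List.getD_eq_getElem mid [] hi]
    by_cases hcase : i < mid.length - sub.length
    · have hcond : (↑i : Int) < ol := by omega
      have hside : (List.replicate (mid.length - sub.length) (List.replicate w ' ')
          ++ sub.map (fun z => ljustC z w))[i]'(by simp; omega) = List.replicate w ' ' := by
        rw [List.getElem_append_left (by simpa using hcase), List.getElem_replicate]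
      rw [if_pos hcond, hmidi, hside]
    · have hcond : ¬ ((↑i : Int) < ol) := by omega
      have hnn : (0 : Int) ≤ ↑i - ol := by omega
      have hidx : (↑i - ol : Int) = ((i - (mid.length - sub.length) : Nat) : Int) := by
        omega
      have hlt : i - (mid.length - sub.length) < sub.length := by omega
      have hget : PySem.List.pyGetD sub (↑i - ol) []
          = sub[i - (mid.length - sub.length)]'hlt := by
        rw [hidx, PySem.List.pyGetD_natCast, List.getD_eq_getElem sub [] hlt]
      have hside : (List.replicate (mid.length - sub.length) (List.replicate w ' ')
          ++ sub.map (fun z => ljustC z w))[i]'(by simp; omega)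
          = ljustC (sub[i - (mid.length - sub.length)]'hlt) w := by
        rw [List.getElem_append_right (by simpa using hcase), List.getElem_map]
        simp
      rw [if_neg hcond, hmidi, hget, hside]

theorem pyramide_seqC_eq (n : Int) (k : Int) : 1 ≤ n →
    pyramide_seqC n k = PySem.Chars.join ['\n'] (seqLinesC n k) := by
  induction n, k using seqLinesC.induct with
  | case1 n =>
    intro _
    rw [pyramide_seqC, if_pos rfl, seqLinesC, if_pos rfl]
    exact pyramideC_eq n
  | case2 k hk =>
    intro _
    rw [pyramide_seqC, if_neg hk, if_pos (by omega : (1 : Int) ≤ 1), seqLinesC, if_neg hk,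
      if_pos rfl, PySem.Chars.join_singleton]
  | case3 n k hk hn hg =>
    intro h
    exact absurd h (by omega)
  | case4 n k hk hn hg ih =>
    intro h
    have hn2 : ¬ n ≤ 1 := by omega
    have hfd : PySem.Int.floordiv n 2 = n / 2 := PySem.Int.floordiv_eq_ediv_of_pos (by omega)
    have h1' : 1 ≤ PySem.Int.floordiv n 2 := by rw [hfd]; omega
    have ihh := ih h1'
    have hsj1 := split_join _ (seqLinesC_no_nl (PySem.Int.floordiv n 2) (k - 1))
      (seqLinesC_ne_nil _ _ h1')
    have hsj2 := split_join _ (pyrLinesC_no_nl n) (pyrLinesC_ne_nil n)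
    have hle : (seqLinesC (PySem.Int.floordiv n 2) (k - 1)).length ≤ (pyrLinesC n).length := by
      rw [seqLinesC_length _ _ h1', pyrLinesC_length n (by omega)]
      rw [hfd] at h1' ⊢
      omega
    rw [pyramide_seqC, if_neg hk, if_neg hn2, seqLinesC, if_neg hk, if_neg hn, if_neg hg]
    simp only [ihh, pyramideC_eq n, hsj1, hsj2]
    exact congrArg _ (comb_lines_eq _ _ hle _ _ _ rfl)

-- ===== VERDICT (by name: the statement is the Claim_ definition above) =====
theorem pyramide_seq_spec : Claim_equal_pyramide_seq := by
  intro n k _ hpre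
  unfold Spec_pyramide_seq pyramide_seq pyramide_seq_alt
  exact congrArg String.ofList (pyramide_seqC_eq n k hpre)
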